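-- pv_equiv track=rewrite | github.com/dlaporte/mcperiscope | backend/mcp_optimizer/analyze.py | _group_traces_by_prompt
-- ===== SOURCE A (Python) =====
-- def _group_traces_by_prompt(traces: list[dict]) -> list[list[dict]]:
--     """Group traces into per-prompt evaluation runs.
--
--     Uses the 'step' field: each time step resets to 0 (or decreases),
--     we start a new group.
--     """
--     if not traces:
--         return []
--
--     groups: list[list[dict]] = []
--     current: list[dict] = [traces[0]]
--
--     for trace in traces[1:]:
--         if trace.get("step", 0) <= current[-1].get("step", -1) and trace.get("step", 0) == 0:
--             groups.append(current)
--             current = [trace]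
--         else:
--             current.append(trace)
--
--     if current:
--         groups.append(current)
--     return groups
-- ===== SOURCE B (Python) =====
-- def _group_traces_by_prompt(traces: list[dict]) -> list[list[dict]]:
--     """Group traces into per-prompt runs: compute all split points first,
--     then partition by slicing (instead of a running-group accumulator)."""
--     if not traces:
--         return []
--     n = len(traces)
--     cuts = [0] + [i for i in range(1, n)
--                   if traces[i].get("step", 0) <= traces[i - 1].get("step", -1)
--                   and traces[i].get("step", 0) == 0] + [n]
--     return [traces[a:b] for a, b in zip(cuts, cuts[1:])]
-- ===== Notes on version B (the rewrite author's own statement) =====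
-- stated objective: alternative
-- what changed: B computes all split points in one pass over adjacent index pairs and then partitions the list by slicing between consecutive cuts, instead of A's running 'current'-group accumulator loop.
import Mathlib
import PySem

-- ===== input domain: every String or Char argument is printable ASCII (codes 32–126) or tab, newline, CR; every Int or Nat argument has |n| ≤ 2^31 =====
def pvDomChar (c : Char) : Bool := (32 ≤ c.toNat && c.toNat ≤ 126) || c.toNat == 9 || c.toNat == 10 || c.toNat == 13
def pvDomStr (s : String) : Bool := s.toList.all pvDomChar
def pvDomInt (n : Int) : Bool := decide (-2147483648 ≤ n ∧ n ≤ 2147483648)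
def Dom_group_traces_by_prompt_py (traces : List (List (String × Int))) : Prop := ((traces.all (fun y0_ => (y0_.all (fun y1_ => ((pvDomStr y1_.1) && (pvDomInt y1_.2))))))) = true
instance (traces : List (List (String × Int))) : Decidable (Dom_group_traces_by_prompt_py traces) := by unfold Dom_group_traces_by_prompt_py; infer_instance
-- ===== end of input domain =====

-- B groups the traces by first collecting all split points in one pass and then slicing between
-- consecutive cuts, instead of A's running-`current` accumulator loop (objective: alternative decomposition).

-- shared primitive: `t.get("step", d)` on an association-list dict (lookup = first match)
def pvGetStep (t : List (String × Int)) (d : Int) : Int := (List.lookup "step" t).getD d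

-- the split predicate, exactly A's (and B's) condition:
-- `cur.get("step",0) <= prev.get("step",-1) and cur.get("step",0) == 0`
def pvPred (prev cur : List (String × Int)) : Bool :=
  decide (pvGetStep cur 0 ≤ pvGetStep prev (-1)) && (pvGetStep cur 0 == 0)

-- ===== PORT A =====
-- the `for trace in traces[1:]` loop; `current[-1]` is `pyGet? current (-1)`
-- (current is always nonempty in A, so the `.getD []` default is never used)
def pvLoopA (groups : List (List (List (String × Int)))) (current : List (List (String × Int))) :
    List (List (String × Int)) → List (List (List (String × Int)))
  | [] => if current.isEmpty then groups else groups ++ [current]   -- `if current: groups.append(current)`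
  | trace :: rest =>
    if pvPred ((PySem.List.pyGet? current (-1)).getD []) trace then
      pvLoopA (groups ++ [current]) [trace] rest
    else
      pvLoopA groups (current ++ [trace]) rest

def group_traces_by_prompt_py (traces : List (List (String × Int))) : List (List (List (String × Int))) :=
  match traces with
  | [] => []
  | t0 :: rest => pvLoopA [] [t0] rest

-- ===== PORT B =====
-- the comprehension's condition at index i (indices come from range(1, n), so both
-- accesses are in range and the `.getD []` default is never used)
def pvBoundaryB (traces : List (List (String × Int))) (i : Int) : Bool :=
  pvPred ((PySem.List.pyGet? traces (i - 1)).getD []) ((PySem.List.pyGet? traces i).getD [])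

def group_traces_by_prompt_py_alt (traces : List (List (String × Int))) : List (List (List (String × Int))) :=
  if traces.isEmpty then []
  else
    let n : Int := traces.length
    let cuts : List Int := 0 :: (PySem.List.pyRange 1 n 1).filter (pvBoundaryB traces) ++ [n]
    (cuts.zip cuts.tail).map (fun p => PySem.List.slice traces (some p.1) (some p.2))

-- ===== PRECONDITION & SPEC =====
def Spec_group_traces_by_prompt_py (traces : List (List (String × Int))) (out : List (List (List (String × Int)))) : Prop := out = group_traces_by_prompt_py_alt traces
instance (traces : List (List (String × Int))) (out : List (List (List (String × Int)))) : Decidable (Spec_group_traces_by_prompt_py traces out) := by unfold Spec_group_traces_by_prompt_py; infer_instance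

-- ===== CLAIM (what is proved, stated in full; the proofs are below) =====
def Claim_equal_group_traces_by_prompt_py : Prop := ∀ (traces : List (List (String × Int))), Dom_group_traces_by_prompt_py traces → Spec_group_traces_by_prompt_py traces (group_traces_by_prompt_py traces)

-- ===== LEMMAS AND PROOFS =====

-- common recursive description of the grouping: `pvChopFrom p rest` groups `rest` knowing the
-- previous trace is `p`; its head group is the (possibly empty) continuation of the current group.
def pvHeadCons (t : List (String × Int)) : List (List (List (String × Int))) → List (List (List (String × Int)))
  | [] => [[t]]
  | g :: gs => (t :: g) :: gs

def pvChopFrom (p : List (String × Int)) : List (List (String × Int)) → List (List (List (String × Int)))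
  | [] => [[]]
  | t :: ts => if pvPred p t then [] :: pvHeadCons t (pvChopFrom t ts) else pvHeadCons t (pvChopFrom t ts)

def pvGlue (cur : List (List (String × Int))) : List (List (List (String × Int))) → List (List (List (String × Int)))
  | [] => [cur]
  | g :: gs => (cur ++ g) :: gs

lemma pvGlue_singleton (t : List (String × Int)) (l : List (List (List (String × Int)))) :
    pvGlue [t] l = pvHeadCons t l := by cases l <;> simp [pvGlue, pvHeadCons]

lemma pvGlue_headCons (cur : List (List (String × Int))) (t : List (String × Int))
    (l : List (List (List (String × Int)))) :
    pvGlue cur (pvHeadCons t l) = pvGlue (cur ++ [t]) l := by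
  cases l <;> simp [pvGlue, pvHeadCons]

-- loop invariant for A's accumulator loop
lemma pvLoopA_eq (rest : List (List (String × Int))) :
    ∀ (groups : List (List (List (String × Int)))) (cur : List (List (String × Int)))
      (p : List (String × Int)), cur.getLast? = some p →
      pvLoopA groups cur rest = groups ++ pvGlue cur (pvChopFrom p rest) := by
  induction rest with
  | nil =>
    intro groups cur p hp
    cases cur with
    | nil => simp at hp
    | cons a as => simp [pvLoopA, pvChopFrom, pvGlue]
  | cons t rest ih =>
    intro groups cur p hp
    unfold pvLoopA
    rw [PySem.List.pyGet?_neg_one, hp]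
    simp only [Option.getD_some]
    by_cases h : pvPred p t = true
    · rw [if_pos h]
      rw [ih (groups ++ [cur]) [t] t rfl]
      simp [pvChopFrom, h, pvGlue]
      cases pvChopFrom t rest <;> rfl
    · rw [if_neg h]
      rw [ih groups (cur ++ [t]) t (by simp)]
      simp [pvChopFrom, h, pvGlue_headCons]

lemma portA_eq_chop (t0 : List (String × Int)) (rest : List (List (String × Int))) :
    group_traces_by_prompt_py (t0 :: rest) = pvHeadCons t0 (pvChopFrom t0 rest) := by
  show pvLoopA [] [t0] rest = _
  rw [pvLoopA_eq rest [] [t0] t0 rfl, pvGlue_singleton]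
  simp

-- ---- B side ----

def pvSlices (xs : List (List (String × Int))) (cuts : List Int) : List (List (List (String × Int))) :=
  (cuts.zip cuts.tail).map (fun p => PySem.List.slice xs (some p.1) (some p.2))

lemma pvAlt_eq_slices (t0 : List (String × Int)) (rest : List (List (String × Int))) :
    group_traces_by_prompt_py_alt (t0 :: rest) =
      pvSlices (t0 :: rest)
        (0 :: (PySem.List.pyRange 1 ((t0 :: rest).length : Int) 1).filter (pvBoundaryB (t0 :: rest))
           ++ [((t0 :: rest).length : Int)]) := by
  simp [group_traces_by_prompt_py_alt, pvSlices]

lemma pyRange_map_add_one (a b : Int) :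
    (PySem.List.pyRange a b 1).map (· + 1) = PySem.List.pyRange (a + 1) (b + 1) 1 := by
  rw [PySem.List.pyRange_one, PySem.List.pyRange_one, List.map_map]
  have h : b + 1 - (a + 1) = b - a := by ring
  rw [h]
  exact List.map_congr_left (fun k _ => by simp; ring)

lemma pvBoundary_shift (x : List (String × Int)) (v : List (List (String × Int))) (j : Int)
    (hj : 1 ≤ j) : pvBoundaryB (x :: v) (j + 1) = pvBoundaryB v j := by
  unfold pvBoundaryB
  rw [PySem.List.pyGet?_of_nonneg _ (by omega : (0:Int) ≤ j + 1),
      PySem.List.pyGet?_of_nonneg _ (by omega : (0:Int) ≤ j + 1 - 1),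
      PySem.List.pyGet?_of_nonneg _ (by omega : (0:Int) ≤ j),
      PySem.List.pyGet?_of_nonneg _ (by omega : (0:Int) ≤ j - 1)]
  have h1 : (j + 1).toNat = j.toNat + 1 := by omega
  have h2 : (j + 1 - 1).toNat = (j - 1).toNat + 1 := by omega
  rw [h1, h2]
  simp

lemma pvBoundary_one (x y : List (String × Int)) (ys : List (List (String × Int))) :
    pvBoundaryB (x :: y :: ys) 1 = pvPred x y := by
  unfold pvBoundaryB
  rw [PySem.List.pyGet?_of_nonneg _ (by norm_num : (0:Int) ≤ 1),
      PySem.List.pyGet?_of_nonneg _ (by norm_num : (0:Int) ≤ 1 - 1)]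
  norm_num

lemma pvSlices_shift (x : List (String × Int)) (v : List (List (String × Int))) (cuts : List Int)
    (h : ∀ c ∈ cuts, 0 ≤ c) :
    pvSlices (x :: v) (cuts.map (· + 1)) = pvSlices v cuts := by
  unfold pvSlices
  rw [← List.map_tail, List.zip_map, List.map_map]
  refine List.map_congr_left (fun p hp => ?_)
  have h1 : 0 ≤ p.1 := h _ (List.of_mem_zip hp).1
  have h2 : 0 ≤ p.2 := h _ (List.mem_of_mem_tail (List.of_mem_zip hp).2)
  simp only [Function.comp, Prod.map]
  rw [PySem.List.slice_toNat (x :: v) (by omega : (0:Int) ≤ p.1 + 1) (by omega : (0:Int) ≤ p.2 + 1),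
      PySem.List.slice_toNat v h1 h2]
  have ha : (p.1 + 1).toNat = p.1.toNat + 1 := by omega
  rw [ha, List.drop_succ_cons]
  congr 1
  omega

lemma pvSlices_cons (xs : List (List (String × Int))) (a b : Int) (t : List Int) :
    pvSlices xs (a :: b :: t) = PySem.List.slice xs (some a) (some b) :: pvSlices xs (b :: t) := rfl

lemma pvSlice_head (x : List (String × Int)) (v : List (List (String × Int))) (c : Int)
    (hc : 0 ≤ c) :
    PySem.List.slice (x :: v) (some 0) (some (c + 1)) = x :: PySem.List.slice v (some 0) (some c) := by
  rw [PySem.List.slice_toNat (x :: v) (le_refl 0) (by omega : (0:Int) ≤ c + 1),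
      PySem.List.slice_toNat v (le_refl 0) hc]
  have h1 : (c + 1).toNat = c.toNat + 1 := by omega
  simp [h1]

lemma pvCuts_nonneg (v : List (List (String × Int))) :
    ∀ c ∈ (0 : Int) :: (PySem.List.pyRange 1 (v.length : Int) 1).filter (pvBoundaryB v)
        ++ [(v.length : Int)], 0 ≤ c := by
  intro c hc
  rcases List.mem_cons.mp hc with h0 | h1
  · omega
  rcases List.mem_append.mp h1 with h2 | h3
  · have := (PySem.List.mem_pyRange_one.mp (List.mem_of_mem_filter h2)).1; omega
  · simp at h3; omega

lemma pvAlt_eq_chop (v : List (List (String × Int))) :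
    ∀ x, group_traces_by_prompt_py_alt (x :: v) = pvHeadCons x (pvChopFrom x v) := by
  induction v with
  | nil =>
    intro x
    rw [pvAlt_eq_slices]
    simp [pvSlices, pvChopFrom, pvHeadCons, PySem.List.pyRange_one_eq_nil (le_refl (1 : Int))]
    rw [PySem.List.slice_to [x] (by norm_num : (0:Int) ≤ 1)]
    rfl
  | cons y ys ih =>
    intro x
    have hlen : ((x :: y :: ys).length : Int) = ((y :: ys).length : Int) + 1 := by
      push_cast [List.length_cons]
      ring
    set m : Int := ((y :: ys).length : Int) with hm
    have hm1 : 1 ≤ m := by rw [hm]; push_cast [List.length_cons]; omega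
    -- the range splits off index 1, and the remaining indices are the shifted range of the tail
    have hrange : PySem.List.pyRange 1 (m + 1) 1
        = 1 :: (PySem.List.pyRange 1 m 1).map (· + 1) := by
      rw [PySem.List.pyRange_one_cons (by omega), pyRange_map_add_one]
    have hfiltmap : ((PySem.List.pyRange 1 m 1).map (· + 1)).filter (pvBoundaryB (x :: y :: ys))
        = ((PySem.List.pyRange 1 m 1).filter (pvBoundaryB (y :: ys))).map (· + 1) := by
      rw [List.filter_map]
      congr 1
      refine List.filter_congr (fun j hj => ?_)
      have hj1 : 1 ≤ j := (PySem.List.mem_pyRange_one.mp hj).1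
      simp only [Function.comp]
      exact pvBoundary_shift x (y :: ys) j hj1
    rw [pvAlt_eq_slices, hlen, hrange]
    rw [List.filter_cons, hfiltmap, pvBoundary_one]
    set bv := (PySem.List.pyRange 1 m 1).filter (pvBoundaryB (y :: ys)) with hbv
    have hnn := pvCuts_nonneg (y :: ys)
    rw [← hm] at hnn
    rw [← hbv] at hnn
    have haltv : group_traces_by_prompt_py_alt (y :: ys) = pvSlices (y :: ys) (0 :: bv ++ [m]) := by
      rw [pvAlt_eq_slices]
    by_cases hp : pvPred x y = true
    · rw [if_pos hp]
      simp only [List.cons_append]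
      rw [pvSlices_cons]
      have h2 : (1 : Int) :: (List.map (fun z => z + 1) bv ++ [m + 1])
          = List.map (fun z => z + 1) (0 :: bv ++ [m]) := by simp
      rw [h2, pvSlices_shift x (y :: ys) _ hnn, ← haltv, ih y]
      have hsl : PySem.List.slice (x :: y :: ys) (some 0) (some 1) = [x] := by
        rw [PySem.List.slice_toNat (x :: y :: ys) (le_refl 0) (by norm_num : (0:Int) ≤ 1)]; rfl
      rw [hsl]
      simp [pvChopFrom, hp, pvHeadCons]
    · rw [if_neg hp]
      simp only [List.cons_append]
      obtain ⟨c, rest, hcv⟩ : ∃ c rest, bv ++ [m] = c :: rest := by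
        cases hb : bv with
        | nil => exact ⟨m, [], by simp⟩
        | cons a as => exact ⟨a, as ++ [m], by simp⟩
      have hcnn : ∀ e ∈ (c :: rest), 0 ≤ e := by
        intro e he
        apply hnn
        have hx : (0:Int) :: bv ++ [m] = (0:Int) :: (c :: rest) := by
          simp only [List.cons_append, hcv]
        rw [hx]
        exact List.mem_cons_of_mem _ he
      have hcuts2 : (0 : Int) :: (List.map (fun z => z + 1) bv ++ [m + 1])
          = 0 :: (c + 1) :: List.map (fun z => z + 1) rest := by
        have hmm : List.map (fun z : Int => z + 1) bv ++ [m + 1]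
            = List.map (fun z : Int => z + 1) (bv ++ [m]) := by simp
        rw [hmm, hcv]
        simp
      rw [hcuts2, pvSlices_cons, pvSlice_head x (y :: ys) c (hcnn c (by simp))]
      have h3 : (c + 1) :: List.map (fun z : Int => z + 1) rest
          = List.map (fun z : Int => z + 1) (c :: rest) := by simp
      rw [h3, pvSlices_shift x (y :: ys) _ hcnn]
      have haltv2 : group_traces_by_prompt_py_alt (y :: ys)
          = PySem.List.slice (y :: ys) (some 0) (some c) :: pvSlices (y :: ys) (c :: rest) := by
        rw [haltv, show ((0:Int) :: bv ++ [m]) = (0:Int) :: (c :: rest) from by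
          simp only [List.cons_append, hcv], pvSlices_cons]
      have hih := ih y
      rw [haltv2] at hih
      simp only [pvChopFrom, if_neg hp]
      rw [← hih]
      simp [pvHeadCons]

-- ===== VERDICT (by name: the statement is the Claim_ definition above) =====
theorem group_traces_by_prompt_py_spec : Claim_equal_group_traces_by_prompt_py := by
  intro traces _
  unfold Spec_group_traces_by_prompt_py
  cases traces with
  | nil => rfl
  | cons t0 rest => rw [portA_eq_chop, pvAlt_eq_chop]
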